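-- pv_equiv track=rewrite | github.com/RamananVr/Leetcodepython | arrays/2145_count_the_hidden_sequences.py | count_hidden_sequences
-- ===== SOURCE A (Python) =====
-- def count_hidden_sequences(differences, lower, upper):
--     """
--     Count the number of valid arrays nums that can be obtained given the differences array and range [lower, upper].
--
--     :param differences: List[int] - The differences array.
--     :param lower: int - The lower bound of the range.
--     :param upper: int - The upper bound of the range.
--     :return: int - The number of valid arrays nums.
--     """
--     # Initialize the first element of nums to 0
--     current = 0
--     min_val, max_val = 0, 0
--
--     # Calculate the prefix sum and track the minimum and maximum values
--     for diff in differences: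
--         current += diff
--         min_val = min(min_val, current)
--         max_val = max(max_val, current)
--
--     # Calculate the range of valid starting values
--     start_min = lower - min_val
--     start_max = upper - max_val
--
--     # The number of valid starting values is the size of the intersection of the range
--     return max(0, start_max - start_min + 1)
-- ===== SOURCE B (Python) =====
-- def count_hidden_sequences(differences, lower, upper):
--     # Divide-and-conquer: the monoid summary (total, min_prefix, max_prefix)
--     # of a segment (prefixes include the empty one) merges as
--     # (sl+sr, min(ml, sl+mr), max(Ml, sl+Mr)); the count is the range width
--     # minus the span of the prefix sums.
--     def summarize(i, j):
--         if j - i == 0: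
--             return (0, 0, 0)
--         if j - i == 1:
--             d = differences[i]
--             return (d, min(0, d), max(0, d))
--         mid = (i + j) // 2
--         sl, ml, Ml = summarize(i, mid)
--         sr, mr, Mr = summarize(mid, j)
--         return (sl + sr, min(ml, sl + mr), max(Ml, sl + Mr))
--     _, mn, mx = summarize(0, len(differences))
--     return max(0, (upper - lower + 1) - (mx - mn))
-- ===== Notes on version B (the rewrite author's own statement) =====
-- stated objective: alternative
-- what changed: A does one left-to-right scan maintaining a running prefix sum with interleaved min/max updates; B computes the (total, min-prefix, max-prefix) segment summary by divide-and-conquer, splitting the array in halves and merging the two summaries with a monoid combine, then returns range-width minus prefix span.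
import Mathlib
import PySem

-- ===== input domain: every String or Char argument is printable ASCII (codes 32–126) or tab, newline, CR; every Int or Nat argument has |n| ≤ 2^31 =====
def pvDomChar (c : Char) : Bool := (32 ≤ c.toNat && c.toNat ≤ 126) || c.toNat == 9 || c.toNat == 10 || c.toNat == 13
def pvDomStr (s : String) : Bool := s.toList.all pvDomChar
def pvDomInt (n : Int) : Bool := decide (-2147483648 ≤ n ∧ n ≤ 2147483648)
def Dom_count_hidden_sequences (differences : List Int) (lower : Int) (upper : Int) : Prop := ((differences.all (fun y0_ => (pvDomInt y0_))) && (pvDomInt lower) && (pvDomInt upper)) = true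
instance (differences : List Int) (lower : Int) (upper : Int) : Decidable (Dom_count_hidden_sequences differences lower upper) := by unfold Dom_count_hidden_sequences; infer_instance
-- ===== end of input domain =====

-- B replaces A's single left-to-right running-min/max scan by a divide-and-conquer
-- computation of the (sum, min-prefix, max-prefix) segment summary (objective: alternative).


-- ===== PORT A =====
-- A's loop: state (current, min_val, max_val), updated per difference.
def chsLoopA : List Int → Int × Int × Int → Int × Int × Int
  | [], s => s
  | d :: ds, (c, mn, mx) => chsLoopA ds (c + d, min mn (c + d), max mx (c + d))

def count_hidden_sequences (differences : List Int) (lower : Int) (upper : Int) : Int :=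
  let s := chsLoopA differences (0, 0, 0)
  let start_min := lower - s.2.1
  let start_max := upper - s.2.2
  max 0 (start_max - start_min + 1)

-- ===== PORT B =====
-- B's recursive segment summary: (sum, min prefix incl. empty, max prefix incl. empty),
-- computed by splitting the segment in halves and merging the two summaries.
def chsSummarize : List Int → Int × Int × Int
  | [] => (0, 0, 0)
  | [d] => (d, min 0 d, max 0 d)
  | a :: b :: rest =>
    let mid := (a :: b :: rest).length / 2
    let l := chsSummarize ((a :: b :: rest).take mid)
    let r := chsSummarize ((a :: b :: rest).drop mid)
    (l.1 + r.1, min l.2.1 (l.1 + r.2.1), max l.2.2 (l.1 + r.2.2))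
termination_by ds => ds.length
decreasing_by
  · simp [List.length_take]; omega
  · simp; omega

def count_hidden_sequences_alt (differences : List Int) (lower : Int) (upper : Int) : Int :=
  let s := chsSummarize differences
  max 0 ((upper - lower + 1) - (s.2.2 - s.2.1))

-- ===== PRECONDITION & SPEC =====
def Spec_count_hidden_sequences (differences : List Int) (lower : Int) (upper : Int) (out : Int) : Prop := out = count_hidden_sequences_alt differences lower upper
instance (differences : List Int) (lower : Int) (upper : Int) (out : Int) : Decidable (Spec_count_hidden_sequences differences lower upper out) := by unfold Spec_count_hidden_sequences; infer_instance

-- ===== CLAIM (what is proved, stated in full; the proofs are below) =====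
def Claim_equal_count_hidden_sequences : Prop := ∀ (differences : List Int) (lower : Int) (upper : Int), Dom_count_hidden_sequences differences lower upper → Spec_count_hidden_sequences differences lower upper (count_hidden_sequences differences lower upper)

-- ===== LEMMAS AND PROOFS =====

-- A's loop over an append is loop-after-loop.
theorem chsLoopA_append (l r : List Int) : ∀ s, chsLoopA (l ++ r) s = chsLoopA r (chsLoopA l s) := by
  induction l with
  | nil => intro s; simp [chsLoopA]
  | cons d l ih => intro ⟨c, mn, mx⟩; simp [chsLoopA, ih]

-- Translation lemma: starting A's loop from (c, mn, mx) with mn ≤ c ≤ mx is the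
-- zero-based run shifted by c, with mn/mx folded in.
theorem chsLoopA_shift (r : List Int) : ∀ (c mn mx : Int), mn ≤ c → c ≤ mx →
    chsLoopA r (c, mn, mx) =
      (c + (chsLoopA r (0, 0, 0)).1,
       min mn (c + (chsLoopA r (0, 0, 0)).2.1),
       max mx (c + (chsLoopA r (0, 0, 0)).2.2)) := by
  induction r with
  | nil =>
    intro c mn mx h1 h2
    simp [chsLoopA]
    constructor <;> omega
  | cons d r ih =>
    intro c mn mx h1 h2
    have hL : chsLoopA (d :: r) (c, mn, mx)
        = chsLoopA r (c + d, min mn (c + d), max mx (c + d)) := rfl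
    have hR : chsLoopA (d :: r) (0, 0, 0)
        = chsLoopA r (d, min 0 d, max 0 d) := by simp [chsLoopA]
    rw [hL, hR,
      ih (c + d) (min mn (c + d)) (max mx (c + d)) (by omega) (by omega),
      ih d (min 0 d) (max 0 d) (by omega) (by omega)]
    refine Prod.ext (by ring) (Prod.ext ?_ ?_) <;> simp <;> omega


-- Invariant of A's loop: from a state with mn ≤ c ≤ mx, min ≤ sum ≤ max stays true.
theorem chsLoopA_inv (ds : List Int) : ∀ (c mn mx : Int), mn ≤ c → c ≤ mx →
    (chsLoopA ds (c, mn, mx)).2.1 ≤ (chsLoopA ds (c, mn, mx)).1 ∧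
    (chsLoopA ds (c, mn, mx)).1 ≤ (chsLoopA ds (c, mn, mx)).2.2 := by
  induction ds with
  | nil => intro c mn mx h1 h2; simp [chsLoopA]; omega
  | cons d ds ih =>
    intro c mn mx h1 h2
    simpa [chsLoopA] using ih (c + d) (min mn (c + d)) (max mx (c + d)) (by omega) (by omega)

-- Summary of a concatenation: merge the two zero-based summaries with the monoid combine.
theorem chsLoopA_combine (l r : List Int) :
    chsLoopA (l ++ r) (0, 0, 0) =
      ((chsLoopA l (0, 0, 0)).1 + (chsLoopA r (0, 0, 0)).1,
       min (chsLoopA l (0, 0, 0)).2.1 ((chsLoopA l (0, 0, 0)).1 + (chsLoopA r (0, 0, 0)).2.1),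
       max (chsLoopA l (0, 0, 0)).2.2 ((chsLoopA l (0, 0, 0)).1 + (chsLoopA r (0, 0, 0)).2.2)) := by
  have hmn := chsLoopA_inv l 0 0 0 le_rfl le_rfl
  rw [chsLoopA_append]
  have hst : chsLoopA l (0, 0, 0)
      = ((chsLoopA l (0, 0, 0)).1, (chsLoopA l (0, 0, 0)).2.1, (chsLoopA l (0, 0, 0)).2.2) := rfl
  conv_lhs => rw [hst]
  exact chsLoopA_shift r _ _ _ hmn.1 hmn.2

-- B's divide-and-conquer summary equals A's loop from the initial state.
theorem chsSummarize_eq (ds : List Int) : chsSummarize ds = chsLoopA ds (0, 0, 0) := by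
  induction ds using chsSummarize.induct with
  | case1 => simp [chsSummarize, chsLoopA]
  | case2 d => simp [chsSummarize, chsLoopA]
  | case3 a b rest mid ihl ihr =>
    rw [chsSummarize]
    conv_rhs => rw [← List.take_append_drop ((a :: b :: rest).length / 2) (a :: b :: rest)]
    rw [chsLoopA_combine]
    rw [show ((a :: b :: rest).length / 2 : Nat) = mid from rfl, ihl, ihr]

-- ===== VERDICT (by name: the statement is the Claim_ definition above) =====
theorem count_hidden_sequences_spec : Claim_equal_count_hidden_sequences := by
  intro ds lower upper _
  unfold Spec_count_hidden_sequences count_hidden_sequences count_hidden_sequences_alt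
  simp only [chsSummarize_eq]
  generalize chsLoopA ds (0, 0, 0) = t
  obtain ⟨sc, mn, mx⟩ := t
  dsimp only
  omega
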